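-- pv_equiv track=rewrite | github.com/justinhammer/InterviewPractice | lowest_summation.py | lowest_summation_of_unique_values
-- ===== SOURCE A (Python) =====
-- def lowest_summation_of_unique_values(arr):
--     total = 0
--     seen = set()
--
--     for n in arr:
--         if n not in seen:
--             seen.add(n)
--             total += n
--         elif n in seen:
--             while n in seen:
--                 n = n+1
--             seen.add(n) # This line can be removed if we don't care about n+1 being added to our list of unique values.
--             total += n
--     return total
-- ===== SOURCE B (Python) =====
-- def lowest_summation_of_unique_values(arr):
--     total = 0
--     prev = None
--     for v in sorted(arr):
--         if prev is not None and v <= prev: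
--             v = prev + 1
--         total += v
--         prev = v
--     return total
-- ===== Notes on version B (the rewrite author's own statement) =====
-- stated objective: faster
-- what changed: Replaces the per-element linear probing over a hash set (worst-case quadratic on duplicate-heavy input) by sorting once and a single pass that bumps each value to max(value, prev+1); correctness rests on the order-independence of next-free-slot allocation, proved in the Lean file.
import Mathlib
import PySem

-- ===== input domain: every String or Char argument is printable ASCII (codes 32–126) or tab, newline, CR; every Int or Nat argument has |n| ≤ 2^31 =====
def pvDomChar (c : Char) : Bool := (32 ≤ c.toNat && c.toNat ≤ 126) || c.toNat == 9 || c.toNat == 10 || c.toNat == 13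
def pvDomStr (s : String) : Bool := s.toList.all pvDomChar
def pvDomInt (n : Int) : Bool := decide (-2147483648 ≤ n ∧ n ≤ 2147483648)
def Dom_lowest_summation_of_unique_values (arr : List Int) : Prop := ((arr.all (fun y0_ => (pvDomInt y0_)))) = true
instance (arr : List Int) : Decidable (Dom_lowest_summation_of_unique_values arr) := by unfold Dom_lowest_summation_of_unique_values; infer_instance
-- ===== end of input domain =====

-- B replaces A's per-element linear probing over a set by sort-once + one pass bumping each
-- value to max(value, prev+1); equivalence rests on order-independence of next-free-slot
-- allocation, proved below.

-- ===== PORT A =====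
-- termination helpers for the 'while n in seen: n = n+1' loop
theorem pvFilterShiftLe (t : List Int) (n : Int) :
    (t.filter (fun x => decide (n < x))).length ≤ (t.filter (fun x => decide (n ≤ x))).length := by
  induction t with
  | nil => simp
  | cons a t ih =>
    simp only [List.filter_cons]
    by_cases h1 : n < a <;> by_cases h2 : n ≤ a <;> simp [h1, h2] <;> omega

theorem pvFilterBumpLt (seen : List Int) (n : Int) (h : n ∈ seen) :
    (seen.filter (fun x => decide (n < x))).length < (seen.filter (fun x => decide (n ≤ x))).length := by
  induction seen with
  | nil => simp at h
  | cons a t ih =>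
    simp only [List.filter_cons]
    rcases List.mem_cons.mp h with rfl | hm
    · have h1 : ¬ (n < n) := by omega
      have h2 : n ≤ n := le_refl n
      simp [h1, h2]
      have := pvFilterShiftLe t n
      omega
    · have := ih hm
      by_cases h1 : n < a <;> by_cases h2 : n ≤ a <;> simp [h1, h2] <;> omega

-- 'while n in seen: n = n + 1' — returns the first value ≥ n not in seen
def pvProbe (seen : PySem.Set Int) (n : Int) : Int :=
  if h : PySem.Set.contains seen n = true then pvProbe seen (n + 1) else n
termination_by (seen.filter (fun x => decide (n ≤ x))).length
decreasing_by
  have hfe : (fun x : Int => decide (n + 1 ≤ x)) = (fun x : Int => decide (n < x)) := by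
    funext x; simp only [decide_eq_decide]; omega
  rw [hfe]
  exact pvFilterBumpLt seen n ((PySem.Set.contains_iff _ _).mp h)

-- loop body of A, step for step
def pvStepA (st : Int × PySem.Set Int) (n : Int) : Int × PySem.Set Int :=
  if PySem.Set.contains st.2 n = false then
    (st.1 + n, PySem.Set.add st.2 n)
  else if PySem.Set.contains st.2 n = true then
    (st.1 + pvProbe st.2 n, PySem.Set.add st.2 (pvProbe st.2 n))
  else st

def lowest_summation_of_unique_values (arr : List Int) : Int :=
  (arr.foldl pvStepA (0, PySem.Set.empty)).1

-- ===== PORT B =====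
-- loop body of B: bump v to prev+1 when prev is not None and v ≤ prev
def pvStepB (st : Int × Option Int) (v : Int) : Int × Option Int :=
  let v' : Int :=
    match st.2 with
    | some p => if v ≤ p then p + 1 else v
    | none => v
  (st.1 + v', some v')

def lowest_summation_of_unique_values_alt (arr : List Int) : Int :=
  ((PySem.List.sorted arr (fun x => x) false).foldl pvStepB (0, (none : Option Int))).1

-- ===== PRECONDITION & SPEC =====
def Spec_lowest_summation_of_unique_values (arr : List Int) (out : Int) : Prop := out = lowest_summation_of_unique_values_alt arr
instance (arr : List Int) (out : Int) : Decidable (Spec_lowest_summation_of_unique_values arr out) := by unfold Spec_lowest_summation_of_unique_values; infer_instance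

-- ===== CLAIM (what is proved, stated in full; the proofs are below) =====
def Claim_equal_lowest_summation_of_unique_values : Prop := ∀ (arr : List Int), Dom_lowest_summation_of_unique_values arr → Spec_lowest_summation_of_unique_values arr (lowest_summation_of_unique_values arr)

-- ===== LEMMAS AND PROOFS =====

-- Abstract model: next-free-slot allocation over a Finset of occupied slots
def allocF (s : Finset Int) (n : Int) : Int :=
  if h : n ∈ s then allocF s (n + 1) else n
termination_by (s.filter (fun x => n ≤ x)).card
decreasing_by
  apply Finset.card_lt_card
  constructor
  · intro x hx
    simp only [Finset.mem_filter] at hx ⊢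
    exact ⟨hx.1, by omega⟩
  · intro hsub
    have h1 : n ∈ s.filter (fun x => n ≤ x) := by simp [h]
    have h2 := hsub h1
    simp at h2

theorem allocF_le (s : Finset Int) (n : Int) : n ≤ allocF s n := by
  induction n using allocF.induct (s := s) with
  | case1 n h ih => rw [allocF, dif_pos h]; omega
  | case2 n h => rw [allocF, dif_neg h]

theorem allocF_not_mem (s : Finset Int) (n : Int) : allocF s n ∉ s := by
  induction n using allocF.induct (s := s) with
  | case1 n h ih => rw [allocF, dif_pos h]; exact ih
  | case2 n h => rw [allocF, dif_neg h]; exact h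

theorem allocF_mem_of_lt (s : Finset Int) (n : Int) :
    ∀ k : Int, n ≤ k → k < allocF s n → k ∈ s := by
  induction n using allocF.induct (s := s) with
  | case1 n h ih =>
    intro k hk1 hk2
    rw [allocF, dif_pos h] at hk2
    by_cases hkn : k = n
    · exact hkn ▸ h
    · exact ih k (by omega) hk2
  | case2 n h =>
    intro k hk1 hk2
    rw [allocF, dif_neg h] at hk2
    omega

theorem allocF_unique (s : Finset Int) (n : Int) :
    ∀ m : Int, n ≤ m → m ∉ s → (∀ k : Int, n ≤ k → k < m → k ∈ s) → allocF s n = m := by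
  induction n using allocF.induct (s := s) with
  | case1 n h ih =>
    intro m h1 h2 h3
    rw [allocF, dif_pos h]
    have hnm : n ≠ m := fun e => h2 (e ▸ h)
    exact ih m (by omega) h2 (fun k hk1 hk2 => h3 k (by omega) hk2)
  | case2 n h =>
    intro m h1 h2 h3
    rw [allocF, dif_neg h]
    by_contra hne
    exact h (h3 n (le_refl n) (by omega))

theorem allocF_insert (s : Finset Int) (x n : Int) :
    allocF (insert x s) n = if allocF s n = x then allocF s (x + 1) else allocF s n := by
  split_ifs with hx
  · apply allocF_unique
    · have h1 := allocF_le s n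
      have h2 := allocF_le s (x + 1)
      omega
    · intro hmem
      rcases Finset.mem_insert.mp hmem with he | hs
      · have := allocF_le s (x + 1); omega
      · exact allocF_not_mem s (x + 1) hs
    · intro k hk1 hk2
      rcases lt_trichotomy k x with hlt | heq | hgt
      · exact Finset.mem_insert_of_mem (allocF_mem_of_lt s n k hk1 (by omega))
      · exact heq ▸ Finset.mem_insert_self x s
      · exact Finset.mem_insert_of_mem (allocF_mem_of_lt s (x + 1) k (by omega) hk2)
  · apply allocF_unique
    · exact allocF_le s n
    · intro hmem
      rcases Finset.mem_insert.mp hmem with he | hs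
      · exact hx he
      · exact allocF_not_mem s n hs
    · intro k hk1 hk2
      exact Finset.mem_insert_of_mem (allocF_mem_of_lt s n k hk1 hk2)

def gstep (st : Int × Finset Int) (n : Int) : Int × Finset Int :=
  (st.1 + allocF st.2 n, insert (allocF st.2 n) st.2)

theorem gstep_comm (st : Int × Finset Int) (a b : Int) :
    gstep (gstep st a) b = gstep (gstep st b) a := by
  obtain ⟨t, s⟩ := st
  simp only [gstep, allocF_insert]
  by_cases h : allocF s b = allocF s a
  · rw [if_pos h, if_pos h.symm, h]
  · have h' : ¬ allocF s a = allocF s b := fun e => h e.symm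
    rw [if_neg h, if_neg h']
    simp only [Prod.mk.injEq]
    exact ⟨by omega, Finset.insert_comm _ _ _⟩

-- A's fold equals the abstract fold (same order), linking the Set to a Finset
theorem pvProbe_eq_allocF (seen : PySem.Set Int) (s : Finset Int)
    (hm : ∀ x : Int, x ∈ seen ↔ x ∈ s) (n : Int) : pvProbe seen n = allocF s n := by
  induction n using pvProbe.induct (seen := seen) with
  | case1 n h ih =>
    have hn : n ∈ s := (hm n).mp ((PySem.Set.contains_iff _ _).mp h)
    rw [pvProbe, allocF, dif_pos h, dif_pos hn]
    exact ih
  | case2 n h =>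
    have hn : n ∉ s := fun hs => h ((PySem.Set.contains_iff _ _).mpr ((hm n).mpr hs))
    rw [pvProbe, allocF, dif_neg h, dif_neg hn]

theorem afold_eq_gfold (arr : List Int) :
    ∀ (t : Int) (seen : PySem.Set Int) (s : Finset Int),
    (∀ x : Int, x ∈ seen ↔ x ∈ s) →
    (arr.foldl pvStepA (t, seen)).1 = (arr.foldl gstep (t, s)).1 := by
  induction arr with
  | nil => intro t seen s hm; rfl
  | cons n rest ih =>
    intro t seen s hm
    simp only [List.foldl_cons]
    have hmem : ∀ (m : Int), (∀ x : Int, x ∈ PySem.Set.add seen m ↔ x ∈ insert m s) := by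
      intro m x
      rw [PySem.Set.mem_add, hm, Finset.mem_insert]
      tauto
    by_cases hn : n ∈ s
    · have hc : PySem.Set.contains seen n = true :=
        (PySem.Set.contains_iff _ _).mpr ((hm n).mpr hn)
      have hp := pvProbe_eq_allocF seen s hm n
      have hmemn : n ∈ seen := (hm n).mpr hn
      have hstep : pvStepA (t, seen) n = (t + pvProbe seen n, PySem.Set.add seen (pvProbe seen n)) := by
        simp [pvStepA, hmemn]
      rw [hstep, hp]
      exact ih _ _ _ (hmem (allocF s n))
    · have hc : PySem.Set.contains seen n = false := by
        cases h' : PySem.Set.contains seen n with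
        | false => rfl
        | true => exact absurd ((hm n).mp ((PySem.Set.contains_iff _ _).mp h')) hn
      have ha : allocF s n = n := by rw [allocF, dif_neg hn]
      have hnm : n ∉ seen := fun hx => hn ((hm n).mp hx)
      have hstep : pvStepA (t, seen) n = (t + n, PySem.Set.add seen n) := by
        simp [pvStepA, hnm]
      have hgstep : gstep (t, s) n = (t + n, insert n s) := by
        simp [gstep, ha]
      rw [hstep, hgstep]
      exact ih _ _ _ (hmem n)

-- On a sorted list the abstract fold is exactly B's single pass
theorem gfold_eq_bfold (rest : List Int) :
    ∀ (t : Int) (s : Finset Int) (p : Int),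
    rest.Pairwise (· ≤ ·) →
    (∀ v ∈ rest, ∀ m : Int, v ≤ m → (m ∈ s ↔ m ≤ p)) →
    (rest.foldl gstep (t, s)).1 = (rest.foldl pvStepB (t, some p)).1 := by
  induction rest with
  | nil => intro t s p _ _; rfl
  | cons v rest ih =>
    intro t s p hpw H
    have hv := List.pairwise_cons.mp hpw
    have Hv := H v (List.mem_cons_self ..)
    simp only [List.foldl_cons]
    by_cases hvp : v ≤ p
    · have ha : allocF s v = p + 1 := by
        apply allocF_unique
        · omega
        · intro hmem
          have := (Hv (p + 1) (by omega)).mp hmem; omega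
        · intro k hk1 hk2
          exact (Hv k hk1).mpr (by omega)
      have hb : pvStepB (t, some p) v = (t + (p + 1), some (p + 1)) := by
        simp [pvStepB, hvp]
      have hg : gstep (t, s) v = (t + (p + 1), insert (p + 1) s) := by
        simp [gstep, ha]
      rw [hb, hg]
      apply ih _ _ _ hv.2
      intro u hu m hm
      have hvu : v ≤ u := hv.1 u hu
      rw [Finset.mem_insert, Hv m (by omega)]
      omega
    · have hvs : v ∉ s := fun hs => hvp ((Hv v (le_refl v)).mp hs)
      have ha : allocF s v = v := by rw [allocF, dif_neg hvs]
      have hb : pvStepB (t, some p) v = (t + v, some v) := by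
        simp [pvStepB, hvp]
      have hg : gstep (t, s) v = (t + v, insert v s) := by
        simp [gstep, ha]
      rw [hb, hg]
      apply ih _ _ _ hv.2
      intro u hu m hm
      have hvu : v ≤ u := hv.1 u hu
      rw [Finset.mem_insert, Hv m (by omega)]
      omega

-- ===== VERDICT (by name: the statement is the Claim_ definition above) =====
theorem lowest_summation_of_unique_values_spec : Claim_equal_lowest_summation_of_unique_values := by
  intro arr _hdom
  unfold Spec_lowest_summation_of_unique_values
  unfold lowest_summation_of_unique_values lowest_summation_of_unique_values_alt
  have h1 : (arr.foldl pvStepA (0, PySem.Set.empty)).1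
      = (arr.foldl gstep ((0 : Int), (∅ : Finset Int))).1 := by
    apply afold_eq_gfold
    intro x
    simp [PySem.Set.empty]
  rw [h1]
  have hperm : arr.Perm (PySem.List.sorted arr (fun x => x) false) :=
    (PySem.List.sorted_perm arr (fun x => x) false).symm
  have h2 : arr.foldl gstep ((0 : Int), (∅ : Finset Int))
      = (PySem.List.sorted arr (fun x => x) false).foldl gstep ((0 : Int), (∅ : Finset Int)) := by
    apply hperm.foldl_eq' (fun x _ y _ z => gstep_comm z x y)
  rw [h2]
  have hpw : (PySem.List.sorted arr (fun x => x) false).Pairwise (· ≤ ·) := by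
    have := PySem.List.sorted_pairwise (xs := arr) (key := fun x => x)
    exact this
  cases hs : PySem.List.sorted arr (fun x => x) false with
  | nil => rfl
  | cons v rest =>
    rw [hs] at hpw
    have hpw' := List.pairwise_cons.mp hpw
    simp only [List.foldl_cons]
    have ha : allocF (∅ : Finset Int) v = v := by rw [allocF]; simp
    simp only [gstep, pvStepB, ha]
    apply gfold_eq_bfold _ _ _ _ hpw'.2
    intro u hu m hm
    have hvu : v ≤ u := hpw'.1 u hu
    simp only [Finset.mem_insert, Finset.notMem_empty, or_false]
    omega
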